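-- pv_equiv track=rewrite | github.com/kimtaejin3/baekjoon-TILs | 백준/Gold/13397. 구간 나누기 2/구간 나누기 2.py | can_divide
-- ===== SOURCE A (Python) =====
-- def can_divide(arr, m, max_diff):
--     count = 1
--     current_min = arr[0]
--     current_max = arr[0]
--
--     for num in arr:
--         if num < current_min:
--             current_min = num
--         if num > current_max:
--             current_max = num
--
--         if current_max - current_min > max_diff:
--             count += 1
--             current_min = num
--             current_max = num
--
--     return count <= m
-- ===== SOURCE B (Python) =====
-- def can_divide(arr, m, max_diff):
--     # Greedy segment jumps located by exponential + binary search on the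
--     # monotone predicate "range(arr[i:j]) <= max_diff", with builtin min/max
--     # over slices instead of an element-wise running min/max.
--     # A valid segment's range is at least 0, so a negative max_diff admits none.
--     if max_diff < 0:
--         return False
--     n = len(arr)
--
--     def ok(i, j):  # arr[i:j] (nonempty) has range <= max_diff
--         return max(arr[i:j]) - min(arr[i:j]) <= max_diff
--
--     count = 0
--     i = 0
--     while i < n:
--         count += 1
--         # longest valid segment length starting at i: gallop then binary search
--         L = 1
--         while i + 2 * L <= n and ok(i, i + 2 * L):
--             L *= 2
--         lo, hi = L, min(2 * L - 1, n - i)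
--         while lo < hi:
--             mid = (lo + hi + 1) // 2
--             if ok(i, i + mid):
--                 lo = mid
--             else:
--                 hi = mid - 1
--         i += lo
--     return count <= m
-- ===== Notes on version B (the rewrite author's own statement) =====
-- stated objective: alternative
-- what changed: B replaces A's element-wise fold with running min/max and in-place reset by greedy segment jumps: each segment's maximal length is located with exponential (doubling) plus binary search on the monotone predicate 'range(arr[i:j]) <= max_diff', evaluated with builtin min/max over slices, preceded by a feasibility check for negative max_diff.
-- intended difference: On nonempty arrays with max_diff < 0 and m >= len(arr)+1, A returns True (its re-processing of arr[0] yields len(arr)+1 'segments') although even a one-element segment has range 0 > max_diff so no valid division exists; B returns False, the intended answer. — e.g. on can_divide([0], 2, -1): A returns true, B returns false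
import Mathlib
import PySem

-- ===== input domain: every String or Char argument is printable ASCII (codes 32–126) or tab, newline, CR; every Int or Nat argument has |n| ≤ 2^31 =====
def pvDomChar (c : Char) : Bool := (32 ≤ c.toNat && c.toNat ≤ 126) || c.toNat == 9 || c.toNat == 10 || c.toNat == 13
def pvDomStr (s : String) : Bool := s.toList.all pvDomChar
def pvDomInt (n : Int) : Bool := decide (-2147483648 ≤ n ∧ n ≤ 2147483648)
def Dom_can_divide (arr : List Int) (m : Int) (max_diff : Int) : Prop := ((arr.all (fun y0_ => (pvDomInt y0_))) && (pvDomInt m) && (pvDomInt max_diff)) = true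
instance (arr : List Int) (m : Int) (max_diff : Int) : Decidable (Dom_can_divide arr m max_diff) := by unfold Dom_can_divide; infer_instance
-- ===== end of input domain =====

-- B replaces A's element-wise running min/max fold by greedy jumps: each segment's
-- maximal length is found with exponential + binary search on the monotone predicate
-- "range(arr[i:j]) <= max_diff", evaluated with min/max over slices (objective: alternative).

-- ===== PORT A =====
-- A's loop body as one step over state (count, current_min, current_max).
def cdStep (max_diff : Int) (st : Int × Int × Int) (num : Int) : Int × Int × Int :=
  let count := st.1
  let current_min := if num < st.2.1 then num else st.2.1
  let current_max := if num > st.2.2 then num else st.2.2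
  if current_max - current_min > max_diff then (count + 1, num, num)
  else (count, current_min, current_max)

def can_divide (arr : List Int) (m : Int) (max_diff : Int) : Bool :=
  match arr with
  | [] => false   -- Python raises IndexError here (arr[0]); excluded by Pre_
  | a0 :: _ =>
    let st := arr.foldl (cdStep max_diff) (1, a0, a0)
    decide (st.1 ≤ m)

-- ===== PORT B =====
-- B's `ok(i, j)`: max(arr[i:j]) - min(arr[i:j]) <= max_diff.  Python max/min raise on an
-- empty slice; B only calls ok with i < j ≤ n, so that branch is unreachable (false here).
def okSeg (arr : List Int) (max_diff : Int) (i j : Nat) : Bool :=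
  match PySem.List.max? (PySem.List.slice arr (some (i : Int)) (some (j : Int))) (fun y => y),
        PySem.List.min? (PySem.List.slice arr (some (i : Int)) (some (j : Int))) (fun y => y) with
  | some mx, some mn => decide (mx - mn ≤ max_diff)
  | _, _ => false

-- B's doubling loop `while i + 2*L <= n and ok(i, i + 2*L): L *= 2` (fuel only for totality).
def altGallop (arr : List Int) (md : Int) (n i : Nat) : Nat → Nat → Nat
  | 0, L => L
  | fuel + 1, L =>
    if i + 2 * L ≤ n ∧ okSeg arr md i (i + 2 * L) then altGallop arr md n i fuel (2 * L) else L

-- B's binary search `while lo < hi: mid = (lo+hi+1)//2; ...` (fuel only for totality).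
def altBsearch (arr : List Int) (md : Int) (i : Nat) : Nat → Nat → Nat → Nat
  | 0, lo, _ => lo
  | fuel + 1, lo, hi =>
    if lo < hi then
      let mid := (lo + hi + 1) / 2
      if okSeg arr md i (i + mid) then altBsearch arr md i fuel mid hi
      else altBsearch arr md i fuel lo (mid - 1)
    else lo

-- B's outer loop `while i < n`: one segment per iteration, jumping by the found length.
def altOuter (arr : List Int) (md : Int) (n : Nat) : Nat → Nat → Int → Int
  | 0, _, count => count
  | fuel + 1, i, count =>
    if i < n then
      let L := altGallop arr md n i n 1
      let hi0 := min (2 * L - 1) (n - i)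
      let lo := altBsearch arr md i hi0 L hi0
      altOuter arr md n fuel (i + lo) (count + 1)
    else count

def can_divide_alt (arr : List Int) (m : Int) (max_diff : Int) : Bool :=
  if max_diff < 0 then false
  else decide (altOuter arr max_diff arr.length arr.length 0 0 ≤ m)

-- ===== PRECONDITION & SPEC =====
-- Pre_ excludes only the empty array, on which A raises IndexError (arr[0]).
def Pre_can_divide (arr : List Int) (m : Int) (max_diff : Int) : Prop := arr ≠ []
instance (arr : List Int) (m : Int) (max_diff : Int) : Decidable (Pre_can_divide arr m max_diff) := by unfold Pre_can_divide; infer_instance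
def pvWitness_can_divide : List Int × Int × Int := ([1, 2, 5], 2, 3)

-- On nonempty arrays with max_diff < 0 and m ≥ len(arr)+1, A returns True (its re-processing of
-- arr[0] yields len(arr)+1 "segments") although even a one-element segment has range 0 > max_diff,
-- so no valid division exists; B returns False, the intended answer.
def D_can_divide (arr : List Int) (m : Int) (max_diff : Int) : Prop :=
  arr ≠ [] ∧ max_diff < 0 ∧ (arr.length : Int) + 1 ≤ m
instance (arr : List Int) (m : Int) (max_diff : Int) : Decidable (D_can_divide arr m max_diff) := by unfold D_can_divide; infer_instance

def Spec_can_divide (arr : List Int) (m : Int) (max_diff : Int) (out : Bool) : Prop := ¬ D_can_divide arr m max_diff → out = can_divide_alt arr m max_diff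
instance (arr : List Int) (m : Int) (max_diff : Int) (out : Bool) : Decidable (Spec_can_divide arr m max_diff out) := by unfold Spec_can_divide; infer_instance

def pvDiffWitness_can_divide : List Int × Int × Int := ([0], 2, -1)
def pvDiffWitnessOut_can_divide : Bool × Bool := (true, false)

-- ===== CLAIM (what is proved, stated in full; the proofs are below) =====
def Claim_unchanged_can_divide : Prop := ∀ (arr : List Int) (m : Int) (max_diff : Int), Dom_can_divide arr m max_diff → Pre_can_divide arr m max_diff → Spec_can_divide arr m max_diff (can_divide arr m max_diff)
def Claim_changed_can_divide : Prop := Dom_can_divide (pvDiffWitness_can_divide.1) (pvDiffWitness_can_divide.2.1) (pvDiffWitness_can_divide.2.2) ∧ Pre_can_divide (pvDiffWitness_can_divide.1) (pvDiffWitness_can_divide.2.1) (pvDiffWitness_can_divide.2.2) ∧ D_can_divide (pvDiffWitness_can_divide.1) (pvDiffWitness_can_divide.2.1) (pvDiffWitness_can_divide.2.2) ∧ can_divide (pvDiffWitness_can_divide.1) (pvDiffWitness_can_divide.2.1) (pvDiffWitness_can_divide.2.2) = pvDiffWitnessOut_can_divide.1 ∧ can_divide_alt (pvDiffWitness_can_divide.1)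 (pvDiffWitness_can_divide.2.1) (pvDiffWitness_can_divide.2.2) = pvDiffWitnessOut_can_divide.2 ∧ pvDiffWitnessOut_can_divide.1 ≠ pvDiffWitnessOut_can_divide.2
def Claim_exact_can_divide : Prop := ∀ (arr : List Int) (m : Int) (max_diff : Int), Dom_can_divide arr m max_diff → Pre_can_divide arr m max_diff → D_can_divide arr m max_diff → can_divide arr m max_diff ≠ can_divide_alt arr m max_diff

-- ===== LEMMAS AND PROOFS =====

-- Proof-layer spec of the greedy: consume elements while the extended range stays ≤ md.
def altExtend (max_diff : Int) (lo hi : Int) (rest : List Int) : List Int :=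
  match rest with
  | [] => []
  | x :: xs =>
    if max hi x - min lo x ≤ max_diff then altExtend max_diff (min lo x) (max hi x) xs
    else x :: xs

-- number of elements altExtend consumes
def extCount (max_diff : Int) (lo hi : Int) : List Int → Nat
  | [] => 0
  | x :: xs =>
    if max hi x - min lo x ≤ max_diff then 1 + extCount max_diff (min lo x) (max hi x) xs
    else 0

def altCountGo (max_diff : Int) : Nat → List Int → Int
  | _, [] => 0
  | 0, _ :: _ => 0
  | fuel + 1, x :: xs => 1 + altCountGo max_diff fuel (altExtend max_diff x x xs)

def altCount (max_diff : Int) (arr : List Int) : Int :=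
  altCountGo max_diff arr.length arr

theorem altExtend_length_le (max_diff lo hi : Int) (rest : List Int) :
    (altExtend max_diff lo hi rest).length ≤ rest.length := by
  induction rest generalizing lo hi with
  | nil => simp [altExtend]
  | cons x xs ih =>
    simp only [altExtend]
    split
    · exact le_trans (ih _ _) (Nat.le_succ _)
    · simp

theorem altCountGo_fuel (max_diff : Int) :
    ∀ (fuel1 : Nat) (l : List Int) (fuel2 : Nat), l.length ≤ fuel1 → l.length ≤ fuel2 →
      altCountGo max_diff fuel1 l = altCountGo max_diff fuel2 l := by
  intro fuel1
  induction fuel1 with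
  | zero =>
    intro l fuel2 h1 _
    cases l with
    | nil => cases fuel2 <;> rfl
    | cons x xs => simp at h1
  | succ f1 ih =>
    intro l fuel2 h1 h2
    cases l with
    | nil => cases fuel2 <;> rfl
    | cons x xs =>
      cases fuel2 with
      | zero => simp at h2
      | succ f2 =>
        simp only [altCountGo]
        have hle := altExtend_length_le max_diff x x xs
        simp only [List.length_cons] at h1 h2
        rw [ih (altExtend max_diff x x xs) f2 (by omega) (by omega)]

theorem altCount_cons (max_diff x : Int) (xs : List Int) :
    altCount max_diff (x :: xs) = 1 + altCount max_diff (altExtend max_diff x x xs) := by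
  have hle := altExtend_length_le max_diff x x xs
  simp only [altCount, List.length_cons, altCountGo]
  rw [altCountGo_fuel max_diff xs.length (altExtend max_diff x x xs)
        (altExtend max_diff x x xs).length hle le_rfl]

theorem altExtend_eq_drop (max_diff lo hi : Int) (rest : List Int) :
    altExtend max_diff lo hi rest = rest.drop (extCount max_diff lo hi rest) := by
  induction rest generalizing lo hi with
  | nil => rfl
  | cons x xs ih =>
    simp only [altExtend, extCount]
    split
    · rw [ih]; simp [Nat.add_comm]
    · simp

theorem extCount_le_length (max_diff lo hi : Int) (rest : List Int) :
    extCount max_diff lo hi rest ≤ rest.length := by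
  induction rest generalizing lo hi with
  | nil => simp [extCount]
  | cons x xs ih =>
    simp only [extCount]
    split
    · have := ih (min lo x) (max hi x); simp; omega
    · simp

-- running min / max over a list from an initial value
theorem foldl_min_le_init (z : Int) (l : List Int) : l.foldl min z ≤ z := by
  induction l generalizing z with
  | nil => simp
  | cons x xs ih => simp only [List.foldl_cons]; exact le_trans (ih _) (min_le_left _ _)

theorem init_le_foldl_max (z : Int) (l : List Int) : z ≤ l.foldl max z := by
  induction l generalizing z with
  | nil => simp
  | cons x xs ih => simp only [List.foldl_cons]; exact le_trans (le_max_left _ _) (ih _)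

-- the range after consuming `extCount` elements stays within md
theorem extCount_ok (max_diff : Int) (rest : List Int) :
    ∀ lo hi : Int, hi - lo ≤ max_diff →
      (rest.take (extCount max_diff lo hi rest)).foldl max hi
        - (rest.take (extCount max_diff lo hi rest)).foldl min lo ≤ max_diff := by
  induction rest with
  | nil => intro lo hi h; simp only [extCount, List.take_nil, List.foldl_nil]; omega
  | cons x xs ih =>
    intro lo hi h
    simp only [extCount]
    split
    · rename_i hfit
      simp only [Nat.add_comm 1, List.take_succ_cons, List.foldl_cons]
      exact ih (min lo x) (max hi x) hfit
    · simp only [List.take_zero, List.foldl_nil]; omega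

-- one more element would break the range
theorem extCount_stop (max_diff : Int) (rest : List Int) :
    ∀ lo hi : Int, extCount max_diff lo hi rest < rest.length →
      max_diff <
        (rest.take (extCount max_diff lo hi rest + 1)).foldl max hi
          - (rest.take (extCount max_diff lo hi rest + 1)).foldl min lo := by
  induction rest with
  | nil => intro lo hi h; simp [extCount] at h
  | cons x xs ih =>
    intro lo hi h
    simp only [extCount] at h ⊢
    split
    · rename_i hfit
      simp only [Nat.add_comm 1, Nat.add_assoc] at *
      simp only [List.take_succ_cons, List.foldl_cons]
      rw [if_pos hfit] at h
      simp only [List.length_cons] at h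
      exact ih (min lo x) (max hi x) (by omega)
    · rename_i hfit
      simp only [List.take_succ_cons, List.take_zero, List.foldl_cons, List.foldl_nil]
      omega

-- okSeg for an in-range window [i, i+L), phrased over the suffix a :: xs = arr.drop i
theorem okSeg_window (arr : List Int) (md : Int) (i L : Nat) (a : Int) (xs : List Int)
    (hdrop : arr.drop i = a :: xs) (hL : 1 ≤ L) (hiL : i + L ≤ arr.length) :
    okSeg arr md i (i + L)
      = decide ((xs.take (L - 1)).foldl max a - (xs.take (L - 1)).foldl min a ≤ md) := by
  obtain ⟨L', rfl⟩ : ∃ L', L = L' + 1 := ⟨L - 1, by omega⟩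
  have hsl : PySem.List.slice arr (some (i : Int)) (some ((i + (L' + 1) : Nat) : Int))
      = a :: xs.take L' := by
    have := PySem.List.slice_natCast (xs := arr) (a := i) (b := i + (L' + 1))
    rw [this, hdrop]
    have h2 : i + (L' + 1) - i = L' + 1 := by omega
    rw [h2, List.take_succ_cons]
  simp only [okSeg, hsl, PySem.List.max?_id_cons, PySem.List.min?_id_cons]
  simp

theorem foldl_min_take_anti (a : Int) (t : List Int) (k k' : Nat) (h : k ≤ k') :
    (t.take k').foldl min a ≤ (t.take k).foldl min a := by
  conv_lhs => rw [← List.take_append_drop k (t.take k')]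
  rw [List.take_take, min_eq_left h, List.foldl_append]
  exact foldl_min_le_init _ _

theorem foldl_max_take_mono (a : Int) (t : List Int) (k k' : Nat) (h : k ≤ k') :
    (t.take k).foldl max a ≤ (t.take k').foldl max a := by
  conv_rhs => rw [← List.take_append_drop k (t.take k')]
  rw [List.take_take, min_eq_left h, List.foldl_append]
  exact init_le_foldl_max _ _

-- monotonicity: a longer valid window stays valid when shortened
theorem okSeg_mono (arr : List Int) (md : Int) (i L L' : Nat)
    (h1 : 1 ≤ L) (hLL : L ≤ L') (hle : i + L' ≤ arr.length)
    (hok : okSeg arr md i (i + L') = true) : okSeg arr md i (i + L) = true := by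
  obtain ⟨a, xs, hdrop⟩ : ∃ a xs, arr.drop i = a :: xs := by
    cases h : arr.drop i with
    | nil =>
      exfalso
      have := List.length_drop (l := arr) (i := i)
      rw [h] at this; simp at this; omega
    | cons a xs => exact ⟨a, xs, rfl⟩
  rw [okSeg_window arr md i L a xs hdrop h1 (by omega)]
  rw [okSeg_window arr md i L' a xs hdrop (by omega) hle] at hok
  simp only [decide_eq_true_eq] at hok ⊢
  have h1' := foldl_min_take_anti a xs (L - 1) (L' - 1) (by omega)
  have h2' := foldl_max_take_mono a xs (L - 1) (L' - 1) (by omega)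
  omega

-- the search target K = 1 + extCount satisfies: valid at K, invalid just above K
theorem searchK_spec (arr : List Int) (md : Int) (i : Nat) (a : Int) (xs : List Int)
    (hmd : 0 ≤ md) (hdrop : arr.drop i = a :: xs) (hi : i < arr.length) :
    let K := 1 + extCount md a a xs
    1 ≤ K ∧ i + K ≤ arr.length ∧ okSeg arr md i (i + K) = true ∧
      (i + K < arr.length → okSeg arr md i (i + K + 1) = false) := by
  intro K
  have hlen : arr.length - i = xs.length + 1 := by
    have := List.length_drop (l := arr) (i := i)
    rw [hdrop] at this; simp at this; omega
  have he := extCount_le_length md a a xs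
  have hKn : i + K ≤ arr.length := by simp only [K]; omega
  refine ⟨by omega, hKn, ?_, ?_⟩
  · rw [okSeg_window arr md i K a xs hdrop (by omega) hKn]
    have := extCount_ok md xs a a (by omega)
    simp only [K, decide_eq_true_eq]
    rw [show 1 + extCount md a a xs - 1 = extCount md a a xs by omega]
    omega
  · intro hlt
    rw [show i + K + 1 = i + (K + 1) by omega,
        okSeg_window arr md i (K + 1) a xs hdrop (by omega) (by omega)]
    have hel : extCount md a a xs < xs.length := by simp only [K] at hlt; omega
    have := extCount_stop md xs a a hel
    simp only [K, decide_eq_false_iff_not]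
    rw [show 1 + extCount md a a xs + 1 - 1 = extCount md a a xs + 1 by omega]
    omega

-- above the maximal valid length every window is invalid
theorem okSeg_above (arr : List Int) (md : Int) (i K : Nat)
    (hstop : i + K < arr.length → okSeg arr md i (i + K + 1) = false)
    (hmono : ∀ L L', 1 ≤ L → L ≤ L' → i + L' ≤ arr.length →
      okSeg arr md i (i + L') = true → okSeg arr md i (i + L) = true) :
    ∀ L, K < L → i + L ≤ arr.length → okSeg arr md i (i + L) = false := by
  intro L hKL hLn
  by_contra h
  rw [Bool.not_eq_false] at h
  have h1 : okSeg arr md i (i + (K + 1)) = true := hmono (K + 1) L (by omega) (by omega) hLn h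
  have h2 := hstop (by omega)
  rw [show i + K + 1 = i + (K + 1) by omega] at h2
  rw [h1] at h2; exact Bool.noConfusion h2

-- gallop postcondition: returns R with R ≤ K ≤ min (2R-1) (n-i)
theorem altGallop_post (arr : List Int) (md : Int) (i K : Nat)
    (hK1 : 1 ≤ K) (hKn : i + K ≤ arr.length)
    (hokK : okSeg arr md i (i + K) = true)
    (hstop : i + K < arr.length → okSeg arr md i (i + K + 1) = false)
    (hmono : ∀ L L', 1 ≤ L → L ≤ L' → i + L' ≤ arr.length →
      okSeg arr md i (i + L') = true → okSeg arr md i (i + L) = true) :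
    ∀ (fuel L : Nat), 1 ≤ L → L ≤ K → arr.length - i - L ≤ fuel →
      1 ≤ altGallop arr md arr.length i fuel L ∧ altGallop arr md arr.length i fuel L ≤ K ∧
        K ≤ min (2 * altGallop arr md arr.length i fuel L - 1) (arr.length - i) := by
  have habove := okSeg_above arr md i K hstop hmono
  intro fuel
  induction fuel with
  | zero =>
    intro L hL1 hLK hfl
    simp only [altGallop]
    omega
  | succ f ih =>
    intro L hL1 hLK hfl
    simp only [altGallop]
    split
    · rename_i hcond
      obtain ⟨h2n, hok2⟩ := hcond
      have h2K : 2 * L ≤ K := by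
        by_contra hgt
        have := habove (2 * L) (by omega) h2n
        rw [hok2] at this; exact Bool.noConfusion this
      exact ih (2 * L) (by omega) h2K (by omega)
    · rename_i hcond
      refine ⟨hL1, hLK, ?_⟩
      by_cases h2n : i + 2 * L ≤ arr.length
      · have hok2 : ¬ (okSeg arr md i (i + 2 * L) = true) := fun h => hcond ⟨h2n, h⟩
        have hK2 : K < 2 * L := by
          by_contra hge
          exact hok2 (hmono (2 * L) K (by omega) (by omega) hKn hokK)
        omega
      · omega

-- binary search returns exactly K
theorem altBsearch_eq (arr : List Int) (md : Int) (i K : Nat)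
    (hK1 : 1 ≤ K) (hKn : i + K ≤ arr.length)
    (hokK : okSeg arr md i (i + K) = true)
    (hstop : i + K < arr.length → okSeg arr md i (i + K + 1) = false)
    (hmono : ∀ L L', 1 ≤ L → L ≤ L' → i + L' ≤ arr.length →
      okSeg arr md i (i + L') = true → okSeg arr md i (i + L) = true) :
    ∀ (fuel lo hi : Nat), 1 ≤ lo → lo ≤ K → K ≤ hi → hi ≤ arr.length - i →
      hi - lo ≤ fuel → altBsearch arr md i fuel lo hi = K := by
  have habove := okSeg_above arr md i K hstop hmono
  intro fuel
  induction fuel with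
  | zero =>
    intro lo hi h1 h2 h3 h4 h5
    simp only [altBsearch]
    omega
  | succ f ih =>
    intro lo hi h1 h2 h3 h4 h5
    simp only [altBsearch]
    split
    · rename_i hlh
      have hmid1 : lo < (lo + hi + 1) / 2 := by omega
      have hmid2 : (lo + hi + 1) / 2 ≤ hi := by omega
      split
      · rename_i hokmid
        have hmidK : (lo + hi + 1) / 2 ≤ K := by
          by_contra hgt
          have := habove ((lo + hi + 1) / 2) (by omega) (by omega)
          rw [hokmid] at this; exact Bool.noConfusion this
        exact ih ((lo + hi + 1) / 2) hi (by omega) hmidK h3 h4 (by omega)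
      · rename_i hnok
        have hKmid : K < (lo + hi + 1) / 2 := by
          by_contra hge
          exact hnok (hmono ((lo + hi + 1) / 2) K (by omega) (by omega) hKn hokK)
        exact ih lo ((lo + hi + 1) / 2 - 1) h1 h2 (by omega) (by omega) (by omega)
    · omega

-- B's outer loop counts exactly the greedy segments of the remaining suffix
theorem altOuter_eq (arr : List Int) (md : Int) (hmd : 0 ≤ md) :
    ∀ (fuel i : Nat) (c : Int), i ≤ arr.length → arr.length - i ≤ fuel →
      altOuter arr md arr.length fuel i c = c + altCount md (arr.drop i) := by
  intro fuel
  induction fuel with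
  | zero =>
    intro i c hin hfl
    have : arr.drop i = [] := List.drop_eq_nil_of_le (by omega)
    simp [altOuter, this, altCount, altCountGo]
  | succ f ih =>
    intro i c hin hfl
    by_cases hi : i < arr.length
    · obtain ⟨a, xs, hdrop⟩ : ∃ a xs, arr.drop i = a :: xs := by
        cases h : arr.drop i with
        | nil =>
          exfalso
          have := List.length_drop (l := arr) (i := i)
          rw [h] at this; simp at this; omega
        | cons a xs => exact ⟨a, xs, rfl⟩
      obtain ⟨hK1, hKn, hokK, hstop⟩ := searchK_spec arr md i a xs hmd hdrop hi
      set K := 1 + extCount md a a xs with hKdef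
      have hmono := fun L L' h1 hLL hle hok => okSeg_mono arr md i L L' h1 hLL hle hok
      obtain ⟨hR1, hRK, hKmin⟩ :=
        altGallop_post arr md i K hK1 hKn hokK hstop hmono arr.length 1 le_rfl hK1 (by omega)
      set R := altGallop arr md arr.length i arr.length 1 with hRdef
      have hbs := altBsearch_eq arr md i K hK1 hKn hokK hstop hmono
        (min (2 * R - 1) (arr.length - i)) R (min (2 * R - 1) (arr.length - i))
        hR1 hRK (by omega) (by omega) (by omega)
      simp only [altOuter]
      rw [if_pos hi]
      rw [← hRdef, hbs]
      have hxs : arr.drop (i + 1) = xs := by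
        rw [← List.tail_drop, hdrop]
        rfl
      have hdropK : arr.drop (i + K) = xs.drop (extCount md a a xs) := by
        have h2 : (arr.drop (i + 1)).drop (extCount md a a xs) = arr.drop (i + K) := by
          rw [List.drop_drop]
          congr 1
          omega
        rw [← h2, hxs]
      rw [ih (i + K) (c + 1) (by omega) (by omega), hdropK, hdrop, altCount_cons,
          altExtend_eq_drop]
      ring
    · have : arr.drop i = [] := List.drop_eq_nil_of_le (by omega)
      simp [altOuter, hi, this, altCount, altCountGo]

-- ===== A-side lemmas: A's fold equals the greedy segment count =====

theorem foldl_cdStep_neg (max_diff : Int) (hmd : max_diff < 0) (l : List Int) :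
    ∀ (c lo hi : Int), (l.foldl (cdStep max_diff) (c, lo, hi)).1 = c + l.length := by
  induction l with
  | nil => intro c lo hi; simp
  | cons x xs ih =>
    intro c lo hi
    have hstep : cdStep max_diff (c, lo, hi) x = (c + 1, x, x) := by
      simp only [cdStep]
      have h1 : (if x < lo then x else lo) ≤ x := by split <;> omega
      have h2 : x ≤ (if x > hi then x else hi) := by split <;> omega
      rw [if_pos (by omega)]
    rw [List.foldl_cons, hstep, ih]
    simp; omega

theorem foldl_cdStep_eq_altCount (max_diff : Int) (hmd : 0 ≤ max_diff) (l : List Int) :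
    ∀ (c lo hi : Int), lo ≤ hi → hi - lo ≤ max_diff →
      (l.foldl (cdStep max_diff) (c, lo, hi)).1
        = c + altCount max_diff (altExtend max_diff lo hi l) := by
  induction l with
  | nil => intro c lo hi _ _; simp [altExtend, altCount, altCountGo]
  | cons x xs ih =>
    intro c lo hi hlh hrng
    have hmin : (if x < lo then x else lo) = min lo x := by
      simp [min_def]; split <;> split <;> omega
    have hmax : (if x > hi then x else hi) = max hi x := by
      simp [max_def]; split <;> split <;> omega
    by_cases hfit : max hi x - min lo x ≤ max_diff
    · have hstep : cdStep max_diff (c, lo, hi) x = (c, min lo x, max hi x) := by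
        simp only [cdStep, hmin, hmax]
        rw [if_neg (by omega)]
      rw [List.foldl_cons, hstep]
      rw [ih c (min lo x) (max hi x) (by omega) hfit]
      simp [altExtend, hfit]
    · have hstep : cdStep max_diff (c, lo, hi) x = (c + 1, x, x) := by
        simp only [cdStep, hmin, hmax]
        rw [if_pos (by omega)]
      rw [List.foldl_cons, hstep]
      rw [ih (c + 1) x x le_rfl (by omega)]
      have hext : altExtend max_diff lo hi (x :: xs) = x :: xs := by
        simp [altExtend, hfit]
      rw [hext, altCount_cons]
      omega

theorem count_eq (max_diff : Int) (hmd : 0 ≤ max_diff) (a0 : Int) (rest : List Int) :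
    ((a0 :: rest).foldl (cdStep max_diff) (1, a0, a0)).1
      = altCount max_diff (a0 :: rest) := by
  have hstep : cdStep max_diff (1, a0, a0) a0 = (1, a0, a0) := by
    simp only [cdStep, lt_self_iff_false, gt_iff_lt, if_false]
    rw [if_neg (by omega)]
  rw [List.foldl_cons, hstep,
      foldl_cdStep_eq_altCount max_diff hmd rest 1 a0 a0 le_rfl (by omega),
      altCount_cons]

-- ===== VERDICT (by name: the statement is the Claim_ definition above) =====
theorem can_divide_spec : Claim_unchanged_can_divide := by
  intro arr m max_diff _ hpre hnD
  cases arr with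
  | nil => exact absurd rfl hpre
  | cons a0 rest =>
    by_cases hmd : max_diff < 0
    · have hm : ¬ ((a0 :: rest).length : Int) + 1 ≤ m := by
        intro h; exact hnD ⟨by simp, hmd, h⟩
      simp only [can_divide, can_divide_alt, if_pos hmd]
      rw [foldl_cdStep_neg max_diff hmd (a0 :: rest) 1 a0 a0]
      simp only [List.length_cons] at hm ⊢
      simp only [decide_eq_false_iff_not]
      push_cast at hm ⊢
      omega
    · simp only [can_divide, can_divide_alt, if_neg hmd]
      rw [count_eq max_diff (by omega) a0 rest,
          altOuter_eq (a0 :: rest) max_diff (by omega) (a0 :: rest).length 0 0 (by omega)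
            (by omega)]
      simp

theorem can_divide_changed : Claim_changed_can_divide := by
  unfold Claim_changed_can_divide; decide

theorem can_divide_tight : Claim_exact_can_divide := by
  intro arr m max_diff _ hpre hD
  obtain ⟨hne, hmd, hm⟩ := hD
  cases arr with
  | nil => exact absurd rfl hne
  | cons a0 rest =>
    simp only [can_divide, can_divide_alt, if_pos hmd]
    rw [foldl_cdStep_neg max_diff hmd (a0 :: rest) 1 a0 a0]
    simp only [List.length_cons] at hm ⊢
    push_cast at hm ⊢
    intro hcontra
    simp only [decide_eq_false_iff_not] at hcontra
    omega
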